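-- pv_equiv track=rewrite | github.com/UmaMaheshwar23631/AAIV6 | aai3.py | dfs
-- ===== SOURCE A (Python) =====
-- def dfs(start, goal):
--     stack = [(start, [start])]
--     visited = set()
--
--     while stack:
--         state, path = stack.pop()
--
--         if state == goal:
--             return path
--
--         if state not in visited:
--             visited.add(state)
--
--             for next_state in [state + 1, state + 2]:
--                 if next_state <= goal:
--                     stack.append((next_state, path + [next_state]))
-- ===== SOURCE B (Python) =====
-- def dfs(start, goal):
--     # Direct construction: A's stack DFS always pops the +2 branch first, so the
--     # returned path is start, start+2, ... with a trailing +1 step when the gap is odd.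
--     if goal < start:
--         return None
--     path = list(range(start, goal + 1, 2))
--     if path[-1] != goal:
--         path.append(goal)
--     return path
-- ===== Notes on version B (the rewrite author's own statement) =====
-- stated objective: alternative
-- what changed: Replaces the explicit-stack DFS with visited set and per-step path copying by a direct closed-form construction of the path (range with step 2 plus an optional trailing goal).
import Mathlib
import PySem

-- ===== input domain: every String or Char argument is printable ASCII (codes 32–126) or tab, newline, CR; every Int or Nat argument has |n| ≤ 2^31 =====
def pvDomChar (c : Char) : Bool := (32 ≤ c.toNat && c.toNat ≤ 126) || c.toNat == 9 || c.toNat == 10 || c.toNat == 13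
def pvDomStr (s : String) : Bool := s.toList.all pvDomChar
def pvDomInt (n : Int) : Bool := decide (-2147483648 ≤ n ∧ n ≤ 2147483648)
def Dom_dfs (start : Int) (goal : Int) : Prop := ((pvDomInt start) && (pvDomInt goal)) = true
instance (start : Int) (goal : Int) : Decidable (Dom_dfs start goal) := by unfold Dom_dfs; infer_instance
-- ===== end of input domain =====

-- B replaces A's explicit-stack DFS (which always pops the +2 branch first) by a direct
-- construction of the same path: range(start, goal+1, 2) plus a trailing goal when the gap is odd.


-- ===== PORT A =====
-- 'while stack:' transliterated with a fuel guard that only makes the loop total; the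
-- fuel passed by `dfs` is proved sufficient below (dfsLoop_chain / dfsLoop_gt).
-- Stack top = list head (Python pushes state+1 then state+2; pop takes state+2 first).
def dfsLoop (goal : Int) : Nat → List (Int × List Int) → PySem.Set Int → Option (List Int)
  | 0, _, _ => none
  | _ + 1, [], _ => none
  | fuel + 1, (state, path) :: rest, visited =>
      if state = goal then some path
      else if PySem.Set.contains visited state then dfsLoop goal fuel rest visited
      else
        let visited' := PySem.Set.add visited state
        let stack1 := if state + 1 ≤ goal then (state + 1, path ++ [state + 1]) :: rest else rest
        let stack2 := if state + 2 ≤ goal then (state + 2, path ++ [state + 2]) :: stack1 else stack1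
        dfsLoop goal fuel stack2 visited'

def dfs (start : Int) (goal : Int) : Option (List Int) :=
  dfsLoop goal ((goal - start).toNat + 2) [(start, [start])] PySem.Set.empty

-- ===== PORT B =====
def dfs_alt (start : Int) (goal : Int) : Option (List Int) :=
  if goal < start then none
  else
    let path := PySem.List.pyRange start (goal + 1) 2
    match PySem.List.pyGet? path (-1) with
    | none => none   -- unreachable here: path is nonempty since start ≤ goal
    | some last => if last ≠ goal then some (path ++ [goal]) else some path

-- ===== PRECONDITION & SPEC =====
def Spec_dfs (start : Int) (goal : Int) (out : Option (List Int)) : Prop := out = dfs_alt start goal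
instance (start : Int) (goal : Int) (out : Option (List Int)) : Decidable (Spec_dfs start goal out) := by unfold Spec_dfs; infer_instance

-- ===== CLAIM (what is proved, stated in full; the proofs are below) =====
def Claim_equal_dfs : Prop := ∀ (start : Int) (goal : Int), Dom_dfs start goal → Spec_dfs start goal (dfs start goal)

-- ===== LEMMAS AND PROOFS =====

-- The path that A's DFS appends after reaching state s (greedy +2 steps, one final +1 when needed).
def tailPath (goal s : Int) : List Int :=
  if goal ≤ s then []
  else if s + 2 ≤ goal then (s + 2) :: tailPath goal (s + 2)
  else [goal]
termination_by (goal - s).toNat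
decreasing_by omega

theorem tailPath_eq_nil (goal s : Int) (h : goal ≤ s) : tailPath goal s = [] := by
  rw [tailPath]; simp [h]

theorem tailPath_step (goal s : Int) (h1 : ¬ goal ≤ s) (h2 : s + 2 ≤ goal) :
    tailPath goal s = (s + 2) :: tailPath goal (s + 2) := by
  rw [tailPath]; simp [h1, h2]

theorem tailPath_last (goal s : Int) (h1 : ¬ goal ≤ s) (h2 : ¬ s + 2 ≤ goal) :
    tailPath goal s = [goal] := by
  rw [tailPath]; simp [h1, h2]

theorem getLast?_cons_ne_nil {a : Int} {l : List Int} (h : l ≠ []) :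
    (a :: l).getLast? = l.getLast? := by
  cases l with
  | nil => exact absurd rfl h
  | cons b t => simp [List.getLast?_cons_cons]

-- pyRange with step 2: induction forms
theorem pyRange_two_nil (a b : Int) (h : b ≤ a) : PySem.List.pyRange a b 2 = [] := by
  rw [PySem.List.pyRange_of_pos a b (by norm_num)]
  simp [show ¬ a < b by omega]

theorem pyRange_two_cons (a b : Int) (h : a < b) :
    PySem.List.pyRange a b 2 = a :: PySem.List.pyRange (a + 2) b 2 := by
  rw [PySem.List.pyRange_of_pos a b (by norm_num),
      PySem.List.pyRange_of_pos (a + 2) b (by norm_num)]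
  by_cases h2 : a + 2 < b
  · have hn : ((b - a + 2 - 1) / 2).toNat = ((b - (a + 2) + 2 - 1) / 2).toNat + 1 := by
      have : (b - a + 2 - 1) / 2 = (b - (a + 2) + 2 - 1) / 2 + 1 := by omega
      omega
    simp only [h, h2, if_pos, hn, List.range_succ_eq_map, List.map_cons, List.map_map]
    congr 1
    · simp
    · apply List.map_congr_left; intro k _; simp [Function.comp]; ring
  · have hn : ((b - a + 2 - 1) / 2).toNat = 1 := by omega
    simp [h, h2, hn, List.range_succ]

-- A's loop on a chain state: with enough fuel, all stack/visited context below the top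
-- is irrelevant and the result is the current path plus the greedy tail.
theorem dfsLoop_chain (goal : Int) :
    ∀ (fuel : Nat) (s : Int) (p : List Int) (rest : List (Int × List Int))
      (visited : PySem.Set Int),
      s ≤ goal → (goal - s).toNat < fuel → (∀ v ∈ visited, v < s) →
      dfsLoop goal fuel ((s, p) :: rest) visited = some (p ++ tailPath goal s) := by
  intro fuel
  induction fuel with
  | zero => intro s p rest visited _ hf _; omega
  | succ f ih =>
    intro s p rest visited hs hf hv
    by_cases hgoal : s = goal
    · subst hgoal
      simp [dfsLoop, tailPath_eq_nil s s le_rfl]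
    · have hlt : s < goal := lt_of_le_of_ne hs hgoal
      have hsnot : s ∉ visited := fun hmem => absurd (hv s hmem) (lt_irrefl s)
      have hv' : ∀ v ∈ PySem.Set.add visited s, v < s + 2 := by
        intro v hvmem
        rcases (PySem.Set.mem_add visited s v).mp hvmem with h' | h'
        · have := hv v h'; omega
        · omega
      by_cases h2 : s + 2 ≤ goal
      · rw [show dfsLoop goal (f + 1) ((s, p) :: rest) visited
              = dfsLoop goal f ((s + 2, p ++ [s + 2]) :: (s + 1, p ++ [s + 1]) :: rest)
                  (PySem.Set.add visited s) by
            simp [dfsLoop, hgoal, hsnot, show s + 1 ≤ goal by omega, h2]]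
        rw [ih (s + 2) (p ++ [s + 2]) _ _ h2 (by omega) hv']
        rw [tailPath_step goal s (by omega) h2]
        simp
      · -- s + 1 = goal: one more pop returns p ++ [goal]
        have hgeq : s + 1 = goal := by omega
        rw [show dfsLoop goal (f + 1) ((s, p) :: rest) visited
              = dfsLoop goal f ((s + 1, p ++ [s + 1]) :: rest) (PySem.Set.add visited s) by
            simp [dfsLoop, hgoal, hsnot, show s + 1 ≤ goal by omega, h2]]
        obtain ⟨f', rfl⟩ : ∃ f', f = f' + 1 := ⟨f - 1, by omega⟩
        rw [tailPath_last goal s (by omega) h2]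
        simp [dfsLoop, hgeq]

-- start > goal: the single pop pushes nothing and the loop runs dry.
theorem dfsLoop_gt (goal start : Int) (f : Nat) (h : goal < start) :
    dfsLoop goal (f + 2) [(start, [start])] PySem.Set.empty = none := by
  simp [dfsLoop, show start ≠ goal by omega, show ¬ start + 1 ≤ goal by omega,
        show ¬ start + 2 ≤ goal by omega, PySem.Set.empty]

-- B's branch computes start :: tailPath goal start when start ≤ goal.
theorem alt_eq_tailPath (goal : Int) :
    ∀ (d : Nat) (s : Int), (goal - s).toNat = d → s ≤ goal →
      (match PySem.List.pyGet? (PySem.List.pyRange s (goal + 1) 2) (-1) with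
        | none => none
        | some last => if last ≠ goal then some (PySem.List.pyRange s (goal + 1) 2 ++ [goal])
                       else some (PySem.List.pyRange s (goal + 1) 2))
      = some (s :: tailPath goal s) := by
  intro d
  induction d using Nat.strong_induction_on with
  | _ d ih =>
    intro s hd hs
    by_cases hgoal : s = goal
    · subst hgoal
      rw [pyRange_two_cons s (s + 1) (by omega), pyRange_two_nil (s + 2) (s + 1) (by omega)]
      simp [PySem.List.pyGet?_neg_one, tailPath_eq_nil s s le_rfl]
    · have hlt : s < goal := lt_of_le_of_ne hs hgoal
      by_cases h2 : s + 2 ≤ goal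
      · -- path = s :: path', path' nonempty, same last element
        have hrec := ih (goal - (s + 2)).toNat (by omega) (s + 2) rfl h2
        have hne : PySem.List.pyRange (s + 2) (goal + 1) 2 ≠ [] := by
          rw [pyRange_two_cons (s + 2) (goal + 1) (by omega)]; simp
        rw [pyRange_two_cons s (goal + 1) (by omega)]
        rw [PySem.List.pyGet?_neg_one, getLast?_cons_ne_nil hne]
        rw [PySem.List.pyGet?_neg_one] at hrec
        rw [tailPath_step goal s (by omega) h2]
        cases hget : (PySem.List.pyRange (s + 2) (goal + 1) 2).getLast? with
        | none => rw [hget] at hrec; simp at hrec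
        | some last =>
          rw [hget] at hrec
          by_cases hl : last = goal
          · simp only [hl, ne_eq, not_true_eq_false, if_false, Option.some.injEq] at hrec
            simp [hl, hrec]
          · simp only [ne_eq, hl, not_false_eq_true, if_true, Option.some.injEq] at hrec
            simp only [ne_eq, hl, not_false_eq_true, if_true, Option.some.injEq]
            rw [show (s :: PySem.List.pyRange (s + 2) (goal + 1) 2) ++ [goal]
                  = s :: (PySem.List.pyRange (s + 2) (goal + 1) 2 ++ [goal]) by simp]
            rw [hrec]
      · -- goal = s + 1: path = [s], last = s, s != goal
        rw [pyRange_two_cons s (goal + 1) (by omega),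
            pyRange_two_nil (s + 2) (goal + 1) (by omega)]
        simp [PySem.List.pyGet?_neg_one, show s ≠ goal from hgoal,
              tailPath_last goal s (by omega) h2]

-- ===== VERDICT (by name: the statement is the Claim_ definition above) =====
theorem dfs_spec : Claim_equal_dfs := by
  intro start goal _
  unfold Spec_dfs dfs dfs_alt
  by_cases h : goal < start
  · rw [dfsLoop_gt goal start _ h]
    simp [h]
  · have hs : start ≤ goal := by omega
    rw [show (goal - start).toNat + 2 = ((goal - start).toNat + 1) + 1 from rfl]
    rw [dfsLoop_chain goal ((goal - start).toNat + 1 + 1) start [start] [] PySem.Set.empty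
          hs (by omega) (by intro v hv; simp [PySem.Set.empty] at hv)]
    rw [if_neg h]
    have := alt_eq_tailPath goal ((goal - start).toNat) start rfl hs
    simp only at this ⊢
    rw [this]
    simp
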